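-- pv_equiv track=rewrite | github.com/guyelov19/EMELD | base_role_approach.py | _hash_speakers
-- ===== SOURCE A (Python) =====
-- def _hash_speakers(speakers_list):
--     """
--     Returns a tuple (hashed_list, mapping) where each speaker is replaced
--     by an identifier such as "Person A", "Person B", etc.
--     """
--     mapping = {}
--     hashed_list = []
--     next_char = ord('A')
--     for speaker in speakers_list:
--         if speaker not in mapping:
--             mapping[speaker] = f"Person {chr(next_char)}"
--             next_char += 1
--         hashed_list.append(mapping[speaker])
--     return hashed_list, mapping
-- ===== SOURCE B (Python) =====
-- def _hash_speakers(speakers_list):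
--     """
--     Returns a tuple (hashed_list, mapping) where each speaker is replaced
--     by an identifier such as "Person A", "Person B", etc.
--     """
--     def label(s):
--         # a speaker's rank is the number of distinct speakers heard strictly
--         # before its first occurrence
--         before = speakers_list[:speakers_list.index(s)]
--         return f"Person {chr(ord('A') + len(set(before)))}"
--     return [label(s) for s in speakers_list], {s: label(s) for s in speakers_list}
-- ===== Notes on version B (the rewrite author's own statement) =====
-- stated objective: alternative
-- what changed: Instead of a stateful loop carrying (mapping, hashed_list, next_char), B labels each occurrence independently by a closed formula: a speaker's letter index is the number of distinct speakers occurring strictly before its first occurrence (via list.index and a set of the prefix); the mapping is a dict comprehension over the whole list relying on dict insertion-order semantics.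
import Mathlib
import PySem

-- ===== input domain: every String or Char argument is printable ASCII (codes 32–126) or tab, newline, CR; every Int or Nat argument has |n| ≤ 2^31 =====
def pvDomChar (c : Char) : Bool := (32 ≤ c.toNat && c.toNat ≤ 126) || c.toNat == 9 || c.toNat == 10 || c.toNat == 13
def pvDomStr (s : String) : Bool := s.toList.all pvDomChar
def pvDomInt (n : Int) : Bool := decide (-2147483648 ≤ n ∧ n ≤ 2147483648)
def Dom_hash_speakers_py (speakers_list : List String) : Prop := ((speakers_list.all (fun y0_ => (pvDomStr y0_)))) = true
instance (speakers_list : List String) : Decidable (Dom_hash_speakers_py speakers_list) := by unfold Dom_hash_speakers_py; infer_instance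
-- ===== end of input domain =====

-- B replaces A's stateful loop carrying (mapping, hashed_list, next_char) by a per-element closed
-- formula: a speaker's letter rank = number of distinct speakers strictly before its first
-- occurrence; objective: alternative (same values, no shared loop state).

-- chr(n) for the codes produced here (exact on this use: 'A' + i)
def pyChr (n : Int) : String := String.ofList [Char.ofNat n.toNat]

-- ===== PORT A =====
-- one loop iteration of A: state = (mapping, hashed_list, next_char)
def hashStep (st : PySem.Dict String String × List String × Int) (speaker : String) :
    PySem.Dict String String × List String × Int :=
  if st.1.contains speaker = false then
    let m := st.1.insert speaker ("Person " ++ pyChr st.2.2)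
    -- mapping[speaker]: the key is always present here, so the getD default is never used
    (m, st.2.1 ++ [m.getD speaker ""], st.2.2 + 1)
  else
    (st.1, st.2.1 ++ [st.1.getD speaker ""], st.2.2)

def hash_speakers_py (speakers_list : List String) : List String × (List (String × String)) :=
  let st := speakers_list.foldl hashStep (PySem.Dict.empty, [], 65)
  (st.2.1, st.1.items)

-- ===== PORT B =====
-- port of Source B's inner `label`: speakers_list[:speakers_list.index(s)], then
-- "Person " + chr(ord('A') + len(set(before))).  `s` is always a member of speakers_list
-- wherever `label` is called, so index() never raises and the getD default is never used.
def labelB (speakers_list : List String) (s : String) : String :=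
  let before := PySem.List.slice speakers_list none
      (some ((PySem.List.index? speakers_list s).getD 0 : Int))
  "Person " ++ pyChr (65 + ((PySem.Set.ofList before).length : Int))

def hash_speakers_py_alt (speakers_list : List String) : List String × (List (String × String)) :=
  (speakers_list.map (labelB speakers_list),
   (PySem.Dict.ofList (speakers_list.map (fun s => (s, labelB speakers_list s)))).items)

-- ===== PRECONDITION & SPEC =====
def Spec_hash_speakers_py (speakers_list : List String) (out : List String × (List (String × String))) : Prop := out = hash_speakers_py_alt speakers_list
instance (speakers_list : List String) (out : List String × (List (String × String))) : Decidable (Spec_hash_speakers_py speakers_list out) := by unfold Spec_hash_speakers_py; infer_instance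

-- ===== CLAIM (what is proved, stated in full; the proofs are below) =====
def Claim_equal_hash_speakers_py : Prop := ∀ (speakers_list : List String), Dom_hash_speakers_py speakers_list → Spec_hash_speakers_py speakers_list (hash_speakers_py speakers_list)

-- ===== LEMMAS AND PROOFS =====

-- the association list A's loop builds for prefix p
def labelPairs (p : List String) : List (String × String) :=
  (PySem.List.enumerate (PySem.List.dedup p)).map (fun q => (q.2, "Person " ++ pyChr (65 + q.1)))

lemma keys_labelPairs (p : List String) :
    (labelPairs p).map Prod.fst = PySem.List.dedup p := by
  simp [labelPairs, List.map_map]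
  exact PySem.List.map_snd_enumerate _ _

lemma contains_mkLabel (p : List String) (x : String) :
    (PySem.Dict.mk (labelPairs p)).contains x = decide (x ∈ p) := by
  rw [PySem.Dict.contains_eq_decide_mem_keys, PySem.Dict.keys_mk]
  have h : List.map (fun q => q.1) (labelPairs p) = PySem.List.dedup p := keys_labelPairs p
  rw [h]
  simp

lemma dedup_snoc (p : List String) (x : String) :
    PySem.List.dedup (p ++ [x]) =
      if x ∈ p then PySem.List.dedup p else PySem.List.dedup p ++ [x] := by
  show PySem.Set.ofList (p ++ [x]) = _
  unfold PySem.Set.ofList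
  rw [List.foldl_append]
  show PySem.Set.add (PySem.List.dedup p) x = _
  unfold PySem.Set.add
  by_cases hx : x ∈ p
  · simp [hx, List.contains_eq_mem]
  · simp [hx, List.contains_eq_mem]

lemma labelPairs_snoc (p : List String) (x : String) :
    labelPairs (p ++ [x]) =
      if x ∈ p then labelPairs p
      else labelPairs p ++ [(x, "Person " ++ pyChr (65 + (PySem.List.dedup p).length))] := by
  unfold labelPairs
  rw [dedup_snoc]
  by_cases hx : x ∈ p
  · simp [hx]
  · simp only [hx, if_false]
    rw [PySem.List.enumerate_append]
    simp [PySem.List.enumerate]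

lemma get?_mk_append (l1 l2 : List (String × String)) (s : String) :
    (PySem.Dict.mk (l1 ++ l2)).get? s =
      ((PySem.Dict.mk l1).get? s).or ((PySem.Dict.mk l2).get? s) := by
  simp [PySem.Dict.get?, List.find?_append, Option.map_or]

lemma get?_mkLabel_snoc (p : List String) (x s : String) (hs : s ∈ p) :
    (PySem.Dict.mk (labelPairs (p ++ [x]))).get? s = (PySem.Dict.mk (labelPairs p)).get? s := by
  rw [labelPairs_snoc]
  by_cases hx : x ∈ p
  · simp [hx]
  · simp only [hx, if_false]
    rw [get?_mk_append]
    have hne : (PySem.Dict.mk (labelPairs p)).get? s ≠ none := by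
      rw [Ne, PySem.Dict.get?_eq_none_iff_not_mem_keys, PySem.Dict.keys_mk]
      have h : List.map (fun q => q.1) (labelPairs p) = PySem.List.dedup p := keys_labelPairs p
      rw [h, PySem.List.mem_dedup]
      simp [hs]
    cases hget : (PySem.Dict.mk (labelPairs p)).get? s with
    | none => exact absurd hget hne
    | some v => rfl

-- the reference state of A's loop after processing prefix p
def stRef (p : List String) : PySem.Dict String String × List String × Int :=
  (PySem.Dict.mk (labelPairs p),
   p.map (fun s => (PySem.Dict.mk (labelPairs p)).getD s ""),
   65 + ((PySem.List.dedup p).length : Int))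

lemma hashStep_stRef (p : List String) (x : String) :
    hashStep (stRef p) x = stRef (p ++ [x]) := by
  by_cases hx : x ∈ p
  · have hM : labelPairs (p ++ [x]) = labelPairs p := by rw [labelPairs_snoc]; simp [hx]
    have hd : PySem.List.dedup (p ++ [x]) = PySem.List.dedup p := by rw [dedup_snoc]; simp [hx]
    unfold hashStep stRef
    rw [hM, hd]
    rw [if_neg (by rw [contains_mkLabel]; simp [hx])]
    simp
  · have hcon : (PySem.Dict.mk (labelPairs p)).contains x = false := by
      rw [contains_mkLabel]; simp [hx]
    have hM : (PySem.Dict.mk (labelPairs p)).insert x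
        ("Person " ++ pyChr (65 + ((PySem.List.dedup p).length : Int))) =
        PySem.Dict.mk (labelPairs (p ++ [x])) := by
      apply PySem.Dict.ext
      rw [PySem.Dict.items_insert_of_not_contains _ _ hcon]
      rw [labelPairs_snoc]
      simp [hx]
    unfold hashStep stRef
    rw [if_pos hcon]
    simp only [hM]
    refine Prod.ext rfl (Prod.ext ?_ ?_)
    · show _ ++ _ = List.map _ (p ++ [x])
      rw [List.map_append]
      congr 1
      apply List.map_congr_left
      intro s hs
      simp only [PySem.Dict.getD]
      rw [get?_mkLabel_snoc p x s hs]
    · show 65 + ((PySem.List.dedup p).length : Int) + 1 = _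
      rw [dedup_snoc]
      simp [hx]
      ring

lemma foldl_hashStep (l : List String) : ∀ p : List String,
    l.foldl hashStep (stRef p) = stRef (p ++ l) := by
  induction l with
  | nil => intro p; simp
  | cons x t ih =>
    intro p
    rw [List.foldl_cons, hashStep_stRef, ih (p ++ [x])]
    simp

-- B's label is stable under extending the list past s's first occurrence
lemma labelB_snoc (p : List String) (x s : String) (hs : s ∈ p) :
    labelB (p ++ [x]) s = labelB p s := by
  unfold labelB
  rw [PySem.List.index?_append_of_mem _ hs]
  cases hidx : PySem.List.index? p s with
  | none => rw [PySem.List.index?_eq_none_iff] at hidx; exact absurd hs hidx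
  | some k =>
    obtain ⟨hk, -, -⟩ := PySem.List.getElem_of_index?_eq_some hidx
    simp only [Option.getD_some]
    rw [PySem.List.slice_to_natCast, PySem.List.slice_to_natCast,
        List.take_append_of_le_length (le_of_lt hk)]

-- B's label of a fresh speaker is the next letter
lemma labelB_fresh (p : List String) (x : String) (hx : x ∉ p) :
    labelB (p ++ [x]) x = "Person " ++ pyChr (65 + ((PySem.List.dedup p).length : Int)) := by
  unfold labelB
  rw [PySem.List.index?_append_singleton_self p x hx]
  simp only [Option.getD_some]
  rw [PySem.List.slice_to_natCast, List.take_left]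
  rfl

-- A's association list IS the dedup list labelled by B's closed formula
lemma labelPairs_eq_map_labelB (xs : List String) :
    labelPairs xs = (PySem.List.dedup xs).map (fun s => (s, labelB xs s)) := by
  induction xs using List.reverseRecOn with
  | nil => rfl
  | append_singleton p x ih =>
    rw [labelPairs_snoc, dedup_snoc]
    by_cases hx : x ∈ p
    · simp only [hx, if_true]
      rw [ih]
      apply List.map_congr_left
      intro s hs
      rw [labelB_snoc p x s ((PySem.List.mem_dedup p s).mp hs)]
    · simp only [hx, if_false]
      have h1 : (PySem.List.dedup p).map (fun s => (s, labelB (p ++ [x]) s)) = labelPairs p := by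
        rw [ih]
        apply List.map_congr_left
        intro s hs
        rw [labelB_snoc p x s ((PySem.List.mem_dedup p s).mp hs)]
      have h2 : [x].map (fun s => (s, labelB (p ++ [x]) s)) =
          [(x, "Person " ++ pyChr (65 + ((PySem.List.dedup p).length : Int)))] := by
        simp [labelB_fresh p x hx]
      rw [List.map_append, h1, h2]

lemma get?_mk_map_self (f : String → String) (us : List String) (s : String) (hs : s ∈ us) :
    (PySem.Dict.mk (us.map (fun u => (u, f u)))).get? s = some (f s) := by
  induction us with
  | nil => simp at hs
  | cons u t ih =>
    rw [List.map_cons, PySem.Dict.get?_mk_cons]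
    by_cases h : u = s
    · simp [h]
    · have ht : s ∈ t := by
        rcases List.mem_cons.mp hs with h' | h'
        · exact absurd h'.symm h
        · exact h'
      simp [h, ih ht]

-- Python's {s: g(s) for s in l}: repeated insertion collapses to first occurrences
lemma ofList_map_eq_mk_dedup (g : String → String) (l : List String) :
    PySem.Dict.ofList (l.map (fun s => (s, g s))) =
      PySem.Dict.mk ((PySem.List.dedup l).map (fun s => (s, g s))) := by
  induction l using List.reverseRecOn with
  | nil => rfl
  | append_singleton p x ih =>
    have hfold : PySem.Dict.ofList ((p ++ [x]).map (fun s => (s, g s))) =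
        (PySem.Dict.ofList (p.map (fun s => (s, g s)))).insert x (g x) := by
      simp only [PySem.Dict.ofList, PySem.Dict.update, List.map_append, List.foldl_append]
      rfl
    rw [hfold, ih, dedup_snoc]
    by_cases hx : x ∈ p
    · simp only [hx, if_true]
      have hcon : (PySem.Dict.mk ((PySem.List.dedup p).map (fun s => (s, g s)))).contains x = true := by
        rw [PySem.Dict.contains_eq_decide_mem_keys, PySem.Dict.keys_mk]
        simp [List.map_map, Function.comp, hx]
      apply PySem.Dict.ext
      rw [PySem.Dict.items_insert_of_contains _ _ hcon]
      show List.map _ (List.map _ _) = _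
      rw [List.map_map]
      apply List.map_congr_left
      intro s _
      by_cases h : s = x
      · simp [h]
      · simp [Function.comp, h]
    · simp only [hx, if_false]
      have hcon : (PySem.Dict.mk ((PySem.List.dedup p).map (fun s => (s, g s)))).contains x = false := by
        rw [PySem.Dict.contains_eq_decide_mem_keys, PySem.Dict.keys_mk]
        simp [List.map_map, Function.comp, hx]
      apply PySem.Dict.ext
      rw [PySem.Dict.items_insert_of_not_contains _ _ hcon]
      simp

-- ===== VERDICT (by name: the statement is the Claim_ definition above) =====
theorem hash_speakers_py_spec : Claim_equal_hash_speakers_py := by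
  intro xs _
  show hash_speakers_py xs = hash_speakers_py_alt xs
  unfold hash_speakers_py hash_speakers_py_alt
  have h0 : (PySem.Dict.empty, ([] : List String), (65 : Int)) = stRef [] := by
    unfold stRef labelPairs
    simp [PySem.List.dedup, PySem.Set.ofList]
    rfl
  rw [h0, foldl_hashStep, List.nil_append]
  show ((stRef xs).2.1, (stRef xs).1.items) = _
  have hmk : PySem.Dict.mk (labelPairs xs) =
      PySem.Dict.ofList (xs.map (fun s => (s, labelB xs s))) := by
    rw [ofList_map_eq_mk_dedup, labelPairs_eq_map_labelB]
  refine Prod.ext ?_ ?_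
  · show xs.map (fun s => (PySem.Dict.mk (labelPairs xs)).getD s "") = xs.map (labelB xs)
    apply List.map_congr_left
    intro s hs
    simp only [PySem.Dict.getD]
    rw [labelPairs_eq_map_labelB,
        get?_mk_map_self (labelB xs) (PySem.List.dedup xs) s ((PySem.List.mem_dedup xs s).mpr hs)]
    rfl
  · show (PySem.Dict.mk (labelPairs xs)).items = _
    rw [hmk]
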